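-- pv_equiv track=rewrite | github.com/rscarmo/QAOA_Maxcut_TSP | plot_solutions.py | interpret_solution
-- ===== SOURCE A (Python) =====
-- def interpret_solution(solution_dict, N):
--     """
--     Interpret a TSP solution with city 0 fixed at position 0 and
--     x_{i}_{p} = 1 meaning city i is placed at position p (1..N-1).
--
--     Returns:
--         tour (list): [0, city_for_position_1, city_for_position_2, ..., city_for_position_(N-1)]
--         or None if invalid.
--     """
--     # We fix city 0 at position 0
--     tour = [0] + [None]*(N-1)  # e.g. for N=4, tour = [0, None, None, None]
--
--     # Counters to ensure each city & each position is used exactly once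
--     city_counts = [0]*N            # city_counts[i] => how many times city i appears
--     position_counts = [0]*N        # position_counts[p] => how many times position p is occupied
--
--     for i in range(1, N):
--         for p in range(1, N):  # now p goes from 1..N-1 inclusive
--             var_name_x_ip = f"x_{i}_{p}"
--             if solution_dict.get(var_name_x_ip, 0) == 1:
--                 # Assign city i to position p
--                 city_counts[i] += 1
--                 position_counts[p] += 1
--
--                 # If city or position is already used more than once => invalid
--                 if city_counts[i] > 1 or position_counts[p] > 1:
--                     return None
--
--                 # Place city i in the tour array at index p
--                 tour[p] = i
--
--     # Check that each city i=1..(N-1) is used exactly once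
--     if any(city_counts[i] != 1 for i in range(1, N)):
--         return None
--
--     # Check that each position p=1..(N-1) is used exactly once
--     if any(position_counts[p] != 1 for p in range(1, N)):
--         return None
--
--     return tour
-- ===== SOURCE B (Python) =====
-- def interpret_solution(solution_dict, N):
--     # Collect-then-validate: gather all selected (city, position) pairs in one scan,
--     # then check both coordinate lists are exactly a permutation of 1..N-1.
--     pairs = [(i, p) for i in range(1, N) for p in range(1, N)
--              if solution_dict.get(f"x_{i}_{p}", 0) == 1]
--     expected = list(range(1, N))
--     if sorted(i for i, _ in pairs) != expected or sorted(p for _, p in pairs) != expected: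
--         return None
--     tour = [0] + [None] * (N - 1)
--     for i, p in pairs:
--         tour[p] = i
--     return tour
-- ===== Notes on version B (the rewrite author's own statement) =====
-- stated objective: simpler
-- what changed: B collects all selected (city, position) pairs in one comprehension and validates afterwards by comparing the sorted city list and sorted position list against range(1, N), replacing A's interleaved counter arrays with early exit inside the nested loop.
import Mathlib
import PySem

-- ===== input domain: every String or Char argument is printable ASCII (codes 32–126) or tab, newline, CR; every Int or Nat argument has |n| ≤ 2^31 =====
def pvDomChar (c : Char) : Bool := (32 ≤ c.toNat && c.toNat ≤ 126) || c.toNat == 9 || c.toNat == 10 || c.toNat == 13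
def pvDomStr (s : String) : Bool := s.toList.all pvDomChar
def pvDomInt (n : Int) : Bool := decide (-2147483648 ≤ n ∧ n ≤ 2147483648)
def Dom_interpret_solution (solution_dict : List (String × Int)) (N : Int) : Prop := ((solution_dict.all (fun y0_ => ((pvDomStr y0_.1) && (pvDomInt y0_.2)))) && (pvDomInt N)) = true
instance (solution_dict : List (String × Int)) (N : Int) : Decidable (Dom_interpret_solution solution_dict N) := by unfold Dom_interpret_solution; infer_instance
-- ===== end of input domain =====

-- B re-implements A as collect-then-validate (gather all selected (city,position) pairs, then
-- compare the sorted coordinate lists with range(1,N)) instead of A's interleaved counter arrays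
-- with early exit; objective: simpler. Proved: equal return value on every input.

-- ===== PORT A =====
-- Literal port of A. The tour list holds Option Int (Python's None entries); on the returning
-- branch every slot is some (each position count is 1), so the final `Option.getD 0` map is exact.
-- All list indices (i, p from range(1,N)) are nonnegative and < length, so `.toNat` + `List.set` /
-- `List.getD` are exact for Python's indexing here.
def interpret_solution (solution_dict : List (String × Int)) (N : Int) : Option (List Int) :=
  let tour : List (Option Int) := some 0 :: List.replicate (N - 1).toNat none
  let city_counts : List Int := List.replicate N.toNat 0
  let position_counts : List Int := List.replicate N.toNat 0
  -- `return None` inside the loops is modelled by an Option state that stays none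
  let st := (PySem.List.pyRange 1 N 1).foldl (fun st i =>
    (PySem.List.pyRange 1 N 1).foldl (fun st p =>
      match st with
      | none => none
      | some (tour, city_counts, position_counts) =>
        if PySem.Dict.getD (PySem.Dict.mk solution_dict)
            ("x_" ++ PySem.Int.toStr i ++ "_" ++ PySem.Int.toStr p) 0 == 1 then
          let city_counts := city_counts.set i.toNat (city_counts.getD i.toNat 0 + 1)
          let position_counts := position_counts.set p.toNat (position_counts.getD p.toNat 0 + 1)
          if city_counts.getD i.toNat 0 > 1 ∨ position_counts.getD p.toNat 0 > 1 then none
          else some (tour.set p.toNat (some i), city_counts, position_counts)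
        else some (tour, city_counts, position_counts)) st)
    (some (tour, city_counts, position_counts))
  match st with
  | none => none
  | some (tour, city_counts, position_counts) =>
    if (PySem.List.pyRange 1 N 1).any (fun i => city_counts.getD i.toNat 0 != 1) then none
    else if (PySem.List.pyRange 1 N 1).any (fun p => position_counts.getD p.toNat 0 != 1) then none
    else some (tour.map (fun o => o.getD 0))

-- ===== PORT B =====
-- Literal port of Source B: collect the pairs, validate both sorted coordinate lists against
-- range(1,N), then build the tour.
def interpret_solution_alt (solution_dict : List (String × Int)) (N : Int) : Option (List Int) :=
  let pairs := (PySem.List.pyRange 1 N 1).flatMap (fun i =>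
    (PySem.List.pyRange 1 N 1).filterMap (fun p =>
      if PySem.Dict.getD (PySem.Dict.mk solution_dict)
          ("x_" ++ PySem.Int.toStr i ++ "_" ++ PySem.Int.toStr p) 0 == 1
      then some (i, p) else none))
  let expected := PySem.List.pyRange 1 N 1
  if PySem.List.sorted (pairs.map (fun ip => ip.1)) (fun x => x) false ≠ expected ∨
     PySem.List.sorted (pairs.map (fun ip => ip.2)) (fun x => x) false ≠ expected then none
  else
    let tour : List (Option Int) := some 0 :: List.replicate (N - 1).toNat none
    let tour := pairs.foldl (fun t ip => t.set ip.2.toNat (some ip.1)) tour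
    some (tour.map (fun o => o.getD 0))

-- ===== PRECONDITION & SPEC =====
def Spec_interpret_solution (solution_dict : List (String × Int)) (N : Int) (out : Option (List Int)) : Prop := out = interpret_solution_alt solution_dict N
instance (solution_dict : List (String × Int)) (N : Int) (out : Option (List Int)) : Decidable (Spec_interpret_solution solution_dict N out) := by unfold Spec_interpret_solution; infer_instance

-- ===== CLAIM (what is proved, stated in full; the proofs are below) =====
def Claim_equal_interpret_solution : Prop := ∀ (solution_dict : List (String × Int)) (N : Int), Dom_interpret_solution solution_dict N → Spec_interpret_solution solution_dict N (interpret_solution solution_dict N)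

-- ===== LEMMAS AND PROOFS =====

-- proof-side names for the pieces of the two ports
def pvR (N : Int) : List Int := PySem.List.pyRange 1 N 1

def pvQ (d : List (String × Int)) (i p : Int) : Bool :=
  PySem.Dict.getD (PySem.Dict.mk d) ("x_" ++ PySem.Int.toStr i ++ "_" ++ PySem.Int.toStr p) 0 == 1

def pvPairs (d : List (String × Int)) (N : Int) : List (Int × Int) :=
  (pvR N).flatMap (fun i => (pvR N).filterMap (fun p => if pvQ d i p then some (i, p) else none))

def pvStep (st : Option (List (Option Int) × List Int × List Int)) (ip : Int × Int) : Option (List (Option Int) × List Int × List Int) :=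
  match st with
  | none => none
  | some (t, cc, pc) =>
    let cc' := cc.set ip.1.toNat (cc.getD ip.1.toNat 0 + 1)
    let pc' := pc.set ip.2.toNat (pc.getD ip.2.toNat 0 + 1)
    if cc'.getD ip.1.toNat 0 > 1 ∨ pc'.getD ip.2.toNat 0 > 1 then none
    else some (t.set ip.2.toNat (some ip.1), cc', pc')

def pvTour0 (N : Int) : List (Option Int) := some 0 :: List.replicate (N - 1).toNat none

def pvTourOf (N : Int) (ps : List (Int × Int)) : List (Option Int) :=
  ps.foldl (fun t ip => t.set ip.2.toNat (some ip.1)) (pvTour0 N)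

def pvS0 (N : Int) : (List (Option Int) × List Int × List Int) := (pvTour0 N, List.replicate N.toNat 0, List.replicate N.toNat 0)

-- the single condition both programs test, phrased on counts
def pvC (d : List (String × Int)) (N : Int) : Prop :=
  (∀ k ∈ pvR N, ((pvPairs d N).map (fun ip => ip.1)).count k = 1) ∧
  (∀ k ∈ pvR N, ((pvPairs d N).map (fun ip => ip.2)).count k = 1)

lemma pvPairs_bounds (d : List (String × Int)) (N : Int) :
    ∀ ip ∈ pvPairs d N, 1 ≤ ip.1 ∧ ip.1 < N ∧ 1 ≤ ip.2 ∧ ip.2 < N := by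
  intro ip hip
  simp only [pvPairs, List.mem_flatMap, List.mem_filterMap, pvR] at hip
  obtain ⟨i, hi, p, hp, hipq⟩ := hip
  rw [PySem.List.mem_pyRange_one] at hi hp
  split at hipq
  · cases hipq; exact ⟨hi.1, hi.2, hp.1, hp.2⟩
  · cases hipq

-- A's nested loop is the fold of pvStep over the collected pair list
lemma pvDoubleFold (d : List (String × Int)) (N : Int) (init : Option (List (Option Int) × List Int × List Int)) :
    (pvR N).foldl (fun st i =>
      (pvR N).foldl (fun st p =>
        match st with
        | none => none
        | some (t, cc, pc) =>
          if pvQ d i p then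
            let cc' := cc.set i.toNat (cc.getD i.toNat 0 + 1)
            let pc' := pc.set p.toNat (pc.getD p.toNat 0 + 1)
            if cc'.getD i.toNat 0 > 1 ∨ pc'.getD p.toNat 0 > 1 then none
            else some (t.set p.toNat (some i), cc', pc')
          else some (t, cc, pc)) st) init
    = (pvPairs d N).foldl pvStep init := by
  rw [pvPairs, List.foldl_flatMap]
  congr 1
  funext st i
  rw [List.foldl_filterMap]
  congr 1
  funext st p
  cases st with
  | none => cases h : pvQ d i p <;> simp [pvStep, h]
  | some s => obtain ⟨t, cc, pc⟩ := s; cases h : pvQ d i p <;> simp [pvStep, h]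

lemma pvNodupSnoc (l : List Int) (a : Int) : (l ++ [a]).Nodup ↔ l.Nodup ∧ a ∉ l := by
  rw [← List.concat_eq_append, List.nodup_concat]; tauto

-- characterisation of the pvStep fold
lemma pvFold_char (N : Int) (ps : List (Int × Int))
    (hb : ∀ ip ∈ ps, 1 ≤ ip.1 ∧ ip.1 < N ∧ 1 ≤ ip.2 ∧ ip.2 < N) :
    ((ps.map (fun ip => ip.1)).Nodup ∧ (ps.map (fun ip => ip.2)).Nodup →
      ∃ cc pc, ps.foldl pvStep (some (pvS0 N)) = some (pvTourOf N ps, cc, pc)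
        ∧ cc.length = N.toNat ∧ pc.length = N.toNat
        ∧ (∀ k : Int, 1 ≤ k → k < N → cc.getD k.toNat 0 = (ps.map (fun ip => ip.1)).count k)
        ∧ (∀ k : Int, 1 ≤ k → k < N → pc.getD k.toNat 0 = (ps.map (fun ip => ip.2)).count k)) ∧
    (¬ ((ps.map (fun ip => ip.1)).Nodup ∧ (ps.map (fun ip => ip.2)).Nodup) →
      ps.foldl pvStep (some (pvS0 N)) = none) := by
  induction ps using List.reverseRecOn with
  | nil =>
    constructor
    · intro _
      refine ⟨List.replicate N.toNat 0, List.replicate N.toNat 0, rfl, by simp, by simp, ?_, ?_⟩ <;>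
        (intro k h1 h2; simp)
    · intro h; exact absurd ⟨List.nodup_nil, List.nodup_nil⟩ h
  | append_singleton ps x ih =>
    have hbps : ∀ ip ∈ ps, 1 ≤ ip.1 ∧ ip.1 < N ∧ 1 ≤ ip.2 ∧ ip.2 < N :=
      fun ip h => hb ip (List.mem_append_left _ h)
    have hbx := hb x (List.mem_append_right _ (List.mem_singleton_self x))
    obtain ⟨ih1, ih2⟩ := ih hbps
    rw [List.foldl_append]
    by_cases hps : (ps.map (fun ip => ip.1)).Nodup ∧ (ps.map (fun ip => ip.2)).Nodup
    · obtain ⟨cc, pc, hfold, hlc, hlp, hcc, hpc⟩ := ih1 hps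
      rw [hfold]
      have hx1 : x.1.toNat < cc.length := by rw [hlc]; omega
      have hx2 : x.2.toNat < pc.length := by rw [hlp]; omega
      have hc1 : cc.getD x.1.toNat 0 = (ps.map (fun ip => ip.1)).count x.1 :=
        hcc x.1 hbx.1 hbx.2.1
      have hc2 : pc.getD x.2.toNat 0 = (ps.map (fun ip => ip.2)).count x.2 :=
        hpc x.2 hbx.2.2.1 hbx.2.2.2
      simp only [List.foldl_cons, List.foldl_nil, pvStep]
      have hs1 : (cc.set x.1.toNat (cc.getD x.1.toNat 0 + 1)).getD x.1.toNat 0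
          = cc.getD x.1.toNat 0 + 1 := by simp [hx1]
      have hs2 : (pc.set x.2.toNat (pc.getD x.2.toNat 0 + 1)).getD x.2.toNat 0
          = pc.getD x.2.toNat 0 + 1 := by simp [hx2]
      by_cases hmem : x.1 ∈ ps.map (fun ip => ip.1) ∨ x.2 ∈ ps.map (fun ip => ip.2)
      · -- duplicate: the step aborts, and the appended list is not nodup
        have hguard : (cc.set x.1.toNat (cc.getD x.1.toNat 0 + 1)).getD x.1.toNat 0 > 1 ∨
            (pc.set x.2.toNat (pc.getD x.2.toNat 0 + 1)).getD x.2.toNat 0 > 1 := by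
          rcases hmem with hm | hm
          · left; rw [hs1, hc1]; have := List.count_pos_iff.mpr hm; omega
          · right; rw [hs2, hc2]; have := List.count_pos_iff.mpr hm; omega
        have hnotnodup : ¬ (((ps ++ [x]).map (fun ip => ip.1)).Nodup ∧
            ((ps ++ [x]).map (fun ip => ip.2)).Nodup) := by
          simp only [List.map_append, List.map_cons, List.map_nil, pvNodupSnoc]
          rintro ⟨⟨-, h1⟩, ⟨-, h2⟩⟩
          rcases hmem with hm | hm
          · exact h1 hm
          · exact h2 hm
        constructor
        · intro h; exact absurd h hnotnodup
        · intro _; simp only [if_pos hguard]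
      · -- fresh pair: the step succeeds and the counters gain one at x
        push_neg at hmem
        have hz1 : (ps.map (fun ip => ip.1)).count x.1 = 0 := List.count_eq_zero.mpr hmem.1
        have hz2 : (ps.map (fun ip => ip.2)).count x.2 = 0 := List.count_eq_zero.mpr hmem.2
        have hguard : ¬ ((cc.set x.1.toNat (cc.getD x.1.toNat 0 + 1)).getD x.1.toNat 0 > 1 ∨
            (pc.set x.2.toNat (pc.getD x.2.toNat 0 + 1)).getD x.2.toNat 0 > 1) := by
          push_neg
          constructor
          · rw [hs1, hc1, hz1]; omega
          · rw [hs2, hc2, hz2]; omega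
        rw [if_neg hguard]
        have hnodup : (((ps ++ [x]).map (fun ip => ip.1)).Nodup ∧
            ((ps ++ [x]).map (fun ip => ip.2)).Nodup) := by
          simp only [List.map_append, List.map_cons, List.map_nil, pvNodupSnoc]
          exact ⟨⟨hps.1, hmem.1⟩, ⟨hps.2, hmem.2⟩⟩
        constructor
        · intro _
          refine ⟨cc.set x.1.toNat (cc.getD x.1.toNat 0 + 1),
            pc.set x.2.toNat (pc.getD x.2.toNat 0 + 1), ?_,
            by simpa using hlc, by simpa using hlp, ?_, ?_⟩
          · have htour : pvTourOf N (ps ++ [x]) = (pvTourOf N ps).set x.2.toNat (some x.1) := by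
              simp [pvTourOf, List.foldl_append]
            rw [htour]
          · intro k h1 h2
            by_cases hk : k = x.1
            · subst hk
              rw [hs1, hc1]
              simp only [List.map_append, List.map_cons, List.map_nil, List.count_append,
                List.count_cons, List.count_nil, beq_self_eq_true, if_true, hz1]
              omega
            · have hkne : k.toNat ≠ x.1.toNat := by omega
              simp only [List.getD, List.getElem?_set_ne (Ne.symm hkne)]
              have := hcc k h1 h2
              simp only [List.getD] at this
              rw [this]
              simp only [List.map_append, List.map_cons, List.map_nil, List.count_append,
                List.count_cons, List.count_nil]
              have : ¬ (x.1 == k) = true := by simpa using fun h => hk h.symm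
              simp [this]
          · intro k h1 h2
            by_cases hk : k = x.2
            · subst hk
              rw [hs2, hc2]
              simp only [List.map_append, List.map_cons, List.map_nil, List.count_append,
                List.count_cons, List.count_nil, beq_self_eq_true, if_true, hz2]
              omega
            · have hkne : k.toNat ≠ x.2.toNat := by omega
              simp only [List.getD, List.getElem?_set_ne (Ne.symm hkne)]
              have := hpc k h1 h2
              simp only [List.getD] at this
              rw [this]
              simp only [List.map_append, List.map_cons, List.map_nil, List.count_append,
                List.count_cons, List.count_nil]
              have : ¬ (x.2 == k) = true := by simpa using fun h => hk h.symm
              simp [this]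
        · intro h; exact absurd hnodup h
    · have hnone := ih2 hps
      rw [hnone]
      have hnot : ¬ (((ps ++ [x]).map (fun ip => ip.1)).Nodup ∧
          ((ps ++ [x]).map (fun ip => ip.2)).Nodup) := by
        simp only [List.map_append, List.map_cons, List.map_nil, pvNodupSnoc]
        rintro ⟨⟨h1, -⟩, ⟨h2, -⟩⟩
        exact hps ⟨h1, h2⟩
      constructor
      · intro h; exact absurd h hnot
      · intro _; simp [pvStep]

lemma pvMemFst (d : List (String × Int)) (N : Int) :
    ∀ x ∈ (pvPairs d N).map (fun ip => ip.1), 1 ≤ x ∧ x < N := by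
  intro x hx
  obtain ⟨ip, hip, rfl⟩ := List.mem_map.mp hx
  exact ⟨(pvPairs_bounds d N ip hip).1, (pvPairs_bounds d N ip hip).2.1⟩

lemma pvMemSnd (d : List (String × Int)) (N : Int) :
    ∀ x ∈ (pvPairs d N).map (fun ip => ip.2), 1 ≤ x ∧ x < N := by
  intro x hx
  obtain ⟨ip, hip, rfl⟩ := List.mem_map.mp hx
  exact ⟨(pvPairs_bounds d N ip hip).2.2.1, (pvPairs_bounds d N ip hip).2.2.2⟩

lemma pvC_nodup (d : List (String × Int)) (N : Int) (hC : pvC d N) :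
    ((pvPairs d N).map (fun ip => ip.1)).Nodup ∧ ((pvPairs d N).map (fun ip => ip.2)).Nodup := by
  constructor
  · rw [List.nodup_iff_count_le_one]
    intro a
    by_cases ha : a ∈ (pvPairs d N).map (fun ip => ip.1)
    · have := pvMemFst d N a ha
      rw [hC.1 a (by rw [pvR, PySem.List.mem_pyRange_one]; exact this)]
    · rw [List.count_eq_zero.mpr ha]; omega
  · rw [List.nodup_iff_count_le_one]
    intro a
    by_cases ha : a ∈ (pvPairs d N).map (fun ip => ip.2)
    · have := pvMemSnd d N a ha
      rw [hC.2 a (by rw [pvR, PySem.List.mem_pyRange_one]; exact this)]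
    · rw [List.count_eq_zero.mpr ha]; omega

-- the port of A, with its nested loop replaced by the fold over pvPairs
lemma pvA_unfold (d : List (String × Int)) (N : Int) :
    interpret_solution d N =
      (match (pvPairs d N).foldl pvStep (some (pvS0 N)) with
       | none => none
       | some (t, cc, pc) =>
         if (pvR N).any (fun i => cc.getD i.toNat 0 != 1) then none
         else if (pvR N).any (fun p => pc.getD p.toNat 0 != 1) then none
         else some (t.map (fun o => o.getD 0))) := by
  have h := pvDoubleFold d N (some (pvS0 N))
  simp only [pvQ, pvR, pvS0, pvTour0] at h ⊢
  simp only [interpret_solution]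
  rw [h]
  rcases (pvPairs d N).foldl pvStep _ with _ | ⟨t, cc, pc⟩ <;> rfl

lemma pvA_eq_pos (d : List (String × Int)) (N : Int) (hC : pvC d N) :
    interpret_solution d N = some ((pvTourOf N (pvPairs d N)).map (fun o => o.getD 0)) := by
  obtain ⟨cc, pc, hfold, _, _, hcc, hpc⟩ :=
    (pvFold_char N (pvPairs d N) (pvPairs_bounds d N)).1 (pvC_nodup d N hC)
  rw [pvA_unfold, hfold]
  have h1 : (pvR N).any (fun i => cc.getD i.toNat 0 != 1) = false := by
    rw [List.any_eq_false]
    intro i hi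
    have hm : 1 ≤ i ∧ i < N := PySem.List.mem_pyRange_one.mp (by rwa [pvR] at hi)
    rw [bne_iff_ne, ne_eq, not_not, hcc i hm.1 hm.2, hC.1 i hi]
    rfl
  have h2 : (pvR N).any (fun p => pc.getD p.toNat 0 != 1) = false := by
    rw [List.any_eq_false]
    intro p hp
    have hm : 1 ≤ p ∧ p < N := PySem.List.mem_pyRange_one.mp (by rwa [pvR] at hp)
    rw [bne_iff_ne, ne_eq, not_not, hpc p hm.1 hm.2, hC.2 p hp]
    rfl
  simp only [h1, h2, Bool.false_eq_true, if_false]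

lemma pvA_eq_neg (d : List (String × Int)) (N : Int) (hC : ¬ pvC d N) :
    interpret_solution d N = none := by
  rw [pvA_unfold]
  by_cases hnd : ((pvPairs d N).map (fun ip => ip.1)).Nodup ∧
      ((pvPairs d N).map (fun ip => ip.2)).Nodup
  · obtain ⟨cc, pc, hfold, _, _, hcc, hpc⟩ :=
      (pvFold_char N (pvPairs d N) (pvPairs_bounds d N)).1 hnd
    rw [hfold]
    rw [pvC, not_and_or] at hC
    rcases hC with hC | hC
    · push_neg at hC
      obtain ⟨k, hk, hkc⟩ := hC
      have hm := PySem.List.mem_pyRange_one.mp (by rwa [pvR] at hk)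
      have hone : (pvR N).any (fun i => cc.getD i.toNat 0 != 1) = true := by
        rw [List.any_eq_true]
        refine ⟨k, hk, ?_⟩
        rw [bne_iff_ne, ne_eq, hcc k hm.1 hm.2]
        exact_mod_cast hkc
      simp only [hone, reduceIte]
    · push_neg at hC
      obtain ⟨k, hk, hkc⟩ := hC
      have hm := PySem.List.mem_pyRange_one.mp (by rwa [pvR] at hk)
      have hone : (pvR N).any (fun p => pc.getD p.toNat 0 != 1) = true := by
        rw [List.any_eq_true]
        refine ⟨k, hk, ?_⟩
        rw [bne_iff_ne, ne_eq, hpc k hm.1 hm.2]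
        exact_mod_cast hkc
      rcases h : (pvR N).any (fun i => cc.getD i.toNat 0 != 1) <;>
        simp only [h, hone, Bool.false_eq_true, if_false, reduceIte]
  · rw [(pvFold_char N (pvPairs d N) (pvPairs_bounds d N)).2 hnd]

lemma pvSorted_iff (N : Int) (l : List Int) (hb : ∀ x ∈ l, 1 ≤ x ∧ x < N) :
    PySem.List.sorted l (fun x => x) false = pvR N ↔
      (∀ k ∈ pvR N, l.count k = 1) := by
  have hnd : (pvR N).Nodup := by rw [pvR]; exact PySem.List.nodup_pyRange_one 1 N
  constructor
  · intro h k hk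
    have hperm : (pvR N).Perm l := h ▸ (PySem.List.sorted_perm l (fun x => x) false)
    rw [← hperm.count_eq]
    exact List.count_eq_one_of_mem hnd hk
  · intro h
    have hperm : (pvR N).Perm l := by
      rw [List.perm_iff_count]
      intro a
      by_cases ha : a ∈ pvR N
      · rw [h a ha]
        exact List.count_eq_one_of_mem hnd ha
      · rw [List.count_eq_zero.mpr ha, List.count_eq_zero.mpr]
        intro hal
        exact ha (by rw [pvR, PySem.List.mem_pyRange_one]; exact hb a hal)
    exact PySem.List.sorted_eq_of_perm_of_pairwise_lt l (pvR N) (fun x => x) hperm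
      (by rw [pvR]; exact PySem.List.pairwise_lt_pyRange_one 1 N)

-- the port of B, with its pieces named
lemma pvB_unfold (d : List (String × Int)) (N : Int) :
    interpret_solution_alt d N =
      if PySem.List.sorted ((pvPairs d N).map (fun ip => ip.1)) (fun x => x) false ≠ pvR N ∨
         PySem.List.sorted ((pvPairs d N).map (fun ip => ip.2)) (fun x => x) false ≠ pvR N then none
      else some ((pvTourOf N (pvPairs d N)).map (fun o => o.getD 0)) := by
  simp only [interpret_solution_alt, pvPairs, pvQ, pvR, pvTourOf, pvTour0]
  rfl

lemma pvB_eq_pos (d : List (String × Int)) (N : Int) (hC : pvC d N) :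
    interpret_solution_alt d N = some ((pvTourOf N (pvPairs d N)).map (fun o => o.getD 0)) := by
  rw [pvB_unfold]
  rw [if_neg]
  push_neg
  exact ⟨(pvSorted_iff N _ (pvMemFst d N)).mpr hC.1, (pvSorted_iff N _ (pvMemSnd d N)).mpr hC.2⟩

lemma pvB_eq_neg (d : List (String × Int)) (N : Int) (hC : ¬ pvC d N) :
    interpret_solution_alt d N = none := by
  rw [pvB_unfold]
  rw [if_pos]
  by_contra hcon
  push_neg at hcon
  exact hC ⟨(pvSorted_iff N _ (pvMemFst d N)).mp hcon.1,
    (pvSorted_iff N _ (pvMemSnd d N)).mp hcon.2⟩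

-- ===== VERDICT (by name: the statement is the Claim_ definition above) =====
theorem interpret_solution_spec : Claim_equal_interpret_solution := by
  intro d N _
  unfold Spec_interpret_solution
  by_cases hC : pvC d N
  · rw [pvA_eq_pos d N hC, pvB_eq_pos d N hC]
  · rw [pvA_eq_neg d N hC, pvB_eq_neg d N hC]
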